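-- pv_equiv track=rewrite | github.com/coall132/OCR-azure_facture | API/fonction_ocr.py | supp_esp_point
-- ===== SOURCE A (Python) =====
-- def supp_esp_point(a):
--     stri=''
--     for k,i in enumerate(a[1]):
--         if k!=0:
--             if i==' ' and a[1][k-1]=='.':
--                 pass
--             else:
--                 stri+=i
--         else:
--             stri+=i
--     a[1]=stri
--     return a
-- ===== SOURCE B (Python) =====
-- def supp_esp_point(a):
--     a[1] = a[1].replace('. ', '.')
--     return a
-- ===== Notes on version B (the rewrite author's own statement) =====
-- stated objective: simpler
-- what changed: Replaces A's indexed character-by-character loop (with a[1][k-1] lookback) by a single non-overlapping str.replace('. ', '.') on a[1]; equivalent because A only ever drops the first space after a period.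
import Mathlib
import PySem

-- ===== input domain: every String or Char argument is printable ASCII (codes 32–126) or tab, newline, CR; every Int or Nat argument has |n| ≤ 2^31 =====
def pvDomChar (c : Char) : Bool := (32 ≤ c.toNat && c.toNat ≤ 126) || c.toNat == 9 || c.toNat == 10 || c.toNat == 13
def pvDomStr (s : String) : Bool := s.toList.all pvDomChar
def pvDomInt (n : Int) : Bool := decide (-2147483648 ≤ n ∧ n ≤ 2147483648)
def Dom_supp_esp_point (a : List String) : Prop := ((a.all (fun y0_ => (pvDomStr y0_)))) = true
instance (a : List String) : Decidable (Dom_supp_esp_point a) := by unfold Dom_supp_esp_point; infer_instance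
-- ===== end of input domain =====

-- B replaces A's index-scanning character loop by a single '. ' → '.' str.replace;
-- both mutate a[1] in place and return the same list (equivalence is about the returned value).

-- ===== PORT A =====
-- A's loop: for k,i in enumerate(a[1]): skip i when k≠0, i==' ' and a[1][k-1]=='.';
-- ported as the obvious structural recursion over the characters carrying (k, stri),
-- with the lookback a[1][k-1] done by indexing the full original string, as in A.
def pvLoopA (cs : List Char) : Nat → List Char → List Char → List Char
  | _, stri, [] => stri
  | k, stri, i :: rest =>
      let stri' :=
        if k ≠ 0 then
          if i = ' ' ∧ PySem.List.pyGet? cs ((k : Int) - 1) = some '.' then stri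
          else stri ++ [i]
        else stri ++ [i]
      pvLoopA cs (k + 1) stri' rest

def supp_esp_point (a : List String) : List String :=
  -- a[1]: Pre_ guarantees 2 ≤ a.length, so pyGet? is some; getD "" is unreachable filler
  let s := ((PySem.List.pyGet? a 1).getD "").toList
  let stri := pvLoopA s 0 [] s
  a.set 1 (String.ofList stri)

-- ===== PORT B =====
def supp_esp_point_alt (a : List String) : List String :=
  a.set 1 (PySem.Str.replace ((PySem.List.pyGet? a 1).getD "") ". " ".")

-- ===== PRECONDITION & SPEC =====
-- Pre_ excludes exactly the inputs with fewer than two elements, where Python A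
-- raises IndexError on a[1] (and B raises there too).
def Pre_supp_esp_point (a : List String) : Prop := 2 ≤ a.length
instance (a : List String) : Decidable (Pre_supp_esp_point a) := by unfold Pre_supp_esp_point; infer_instance
def pvWitness_supp_esp_point : List String := ["total: 12. 50 eur", "abc. def. ", "x"]

def Spec_supp_esp_point (a : List String) (out : List String) : Prop := out = supp_esp_point_alt a
instance (a : List String) (out : List String) : Decidable (Spec_supp_esp_point a out) := by unfold Spec_supp_esp_point; infer_instance

-- ===== CLAIM (what is proved, stated in full; the proofs are below) =====
def Claim_equal_supp_esp_point : Prop := ∀ (a : List String), Dom_supp_esp_point a → Pre_supp_esp_point a → Spec_supp_esp_point a (supp_esp_point a)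

-- ===== LEMMAS AND PROOFS =====

-- The '. '→'.' replacement as a two-step recursion on the character list.
def pvRep : List Char → List Char
  | [] => []
  | [c] => [c]
  | c :: c2 :: t => if c = '.' ∧ c2 = ' ' then '.' :: pvRep t else c :: pvRep (c2 :: t)

-- A's loop, rephrased with the previous character carried instead of re-indexed.
def pvProc : Char → List Char → List Char
  | _, [] => []
  | p, c :: t => (if c = ' ' ∧ p = '.' then [] else [c]) ++ pvProc c t

def pvHK : List Char → List Char
  | [] => []
  | c :: t => c :: pvProc c t

theorem pvProc_eq_hk (c : Char) (t : List Char) (h : c = '.' → t.head? ≠ some ' ') :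
    pvProc c t = pvHK t := by
  cases t with
  | nil => rfl
  | cons d t' =>
    simp only [pvProc, pvHK]
    have : ¬ (d = ' ' ∧ c = '.') := by
      rintro ⟨hd, hc⟩; exact h hc (by simp [hd])
    simp [this]

theorem pvHK_eq_rep (l : List Char) : pvHK l = pvRep l := by
  induction l using pvRep.induct with
  | case1 => rfl
  | case2 c => rfl
  | case3 c c2 t hcond ih =>
    obtain ⟨hc, hc2⟩ := hcond
    subst hc hc2
    simp only [pvHK, pvProc, pvRep]
    rw [pvProc_eq_hk ' ' t (by simp), ih]
    rfl
  | case4 c c2 t hcond ih =>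
    have h2 : ¬ (c2 = ' ' ∧ c = '.') := fun ⟨h1, h2⟩ => hcond ⟨h2, h1⟩
    simp only [pvHK, pvProc, pvRep, if_neg hcond, if_neg h2]
    rw [← ih]
    rfl

theorem pvGo_spec (fuel : Nat) (l stri : List Char) (h : l.length ≤ fuel) :
    PySem.Chars.replace.go ['.', ' '] ['.'] fuel l stri = stri.reverse ++ pvRep l := by
  induction fuel generalizing l stri with
  | zero =>
    have hl : l = [] := List.length_eq_zero_iff.mp (Nat.le_zero.mp h)
    subst hl
    simp [PySem.Chars.replace.go, pvRep]
  | succ n ih =>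
    cases l with
    | nil => simp [PySem.Chars.replace.go, pvRep]
    | cons c t =>
      by_cases hp : List.isPrefixOf ['.', ' '] (c :: t) = true
      · obtain ⟨c2, t', rfl, hc, hc2⟩ : ∃ c2 t', t = c2 :: t' ∧ c = '.' ∧ c2 = ' ' := by
          cases t with
          | nil => simp [List.isPrefixOf] at hp
          | cons c2 t' =>
            simp [List.isPrefixOf] at hp
            exact ⟨c2, t', rfl, hp.1.symm, hp.2.symm⟩
        subst hc hc2
        have hlen : t'.length ≤ n := by simp at h; omega
        rw [show PySem.Chars.replace.go ['.', ' '] ['.'] (n + 1) ('.' :: ' ' :: t') stri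
              = PySem.Chars.replace.go ['.', ' '] ['.'] n t' (['.'].reverse ++ stri) from by
            simp [PySem.Chars.replace.go, hp]]
        rw [ih t' (['.'].reverse ++ stri) hlen]
        simp [pvRep]
      · have hlen : t.length ≤ n := by simp at h; omega
        rw [show PySem.Chars.replace.go ['.', ' '] ['.'] (n + 1) (c :: t) stri
              = PySem.Chars.replace.go ['.', ' '] ['.'] n t (c :: stri) from by
            simp [PySem.Chars.replace.go, hp]]
        rw [ih t (c :: stri) hlen]
        have hrep : pvRep (c :: t) = c :: pvRep t := by
          cases t with
          | nil => rfl
          | cons c2 t' =>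
            have : ¬ (c = '.' ∧ c2 = ' ') := by
              rintro ⟨rfl, rfl⟩; simp [List.isPrefixOf] at hp
            simp [pvRep, this]
        simp [hrep]

theorem pvLoop_inv (suf : List Char) : ∀ (pre : List Char) (c : Char) (acc : List Char),
    pvLoopA (pre ++ c :: suf) (pre.length + 1) acc suf = acc ++ pvProc c suf := by
  induction suf with
  | nil => intro pre c acc; simp [pvLoopA, pvProc]
  | cons d t ih =>
    intro pre c acc
    have hcast : ((pre.length + 1 : Nat) : Int) - 1 = ((pre.length : Nat) : Int) := by
      push_cast; ring
    have hget : PySem.List.pyGet? (pre ++ c :: d :: t) (((pre.length + 1 : Nat) : Int) - 1)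
        = some c := by
      rw [hcast, PySem.List.pyGet?_natCast]
      simp
    simp only [pvLoopA, hget, Nat.succ_ne_zero, ne_eq, not_false_eq_true, reduceIte]
    have hsplit : pre ++ c :: d :: t = (pre ++ [c]) ++ d :: t := by simp
    have hlen : pre.length + 1 + 1 = (pre ++ [c]).length + 1 := by simp
    rw [hsplit, hlen, ih (pre ++ [c]) d]
    by_cases hc : d = ' ' ∧ c = '.'
    · simp [pvProc, hc]
    · simp [pvProc, hc]

theorem pvLoopA_eq_rep (cs : List Char) : pvLoopA cs 0 [] cs = pvRep cs := by
  cases cs with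
  | nil => rfl
  | cons c t =>
    have h := pvLoop_inv t [] c [c]
    simp only [List.nil_append, List.length_nil] at h
    simp only [pvLoopA, ne_eq, not_true_eq_false, List.nil_append, reduceIte]
    rw [h, ← pvHK_eq_rep]
    rfl

theorem pvReplace_eq_rep (s : List Char) :
    PySem.Chars.replace s ['.', ' '] ['.'] = pvRep s := by
  rw [PySem.Chars.replace]
  simp only [List.isEmpty_cons, Bool.false_eq_true, if_false]
  rw [pvGo_spec s.length s [] (le_refl _)]
  rfl

-- ===== VERDICT (by name: the statement is the Claim_ definition above) =====
theorem supp_esp_point_spec : Claim_equal_supp_esp_point := by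
  intro a _ _
  unfold Spec_supp_esp_point supp_esp_point supp_esp_point_alt
  rw [PySem.Str.replace]
  have hold : (". " : String).toList = ['.', ' '] := by decide
  have hnew : ("." : String).toList = ['.'] := by decide
  rw [hold, hnew, pvReplace_eq_rep]
  show a.set 1 (String.ofList (pvLoopA _ 0 [] _)) = _
  rw [pvLoopA_eq_rep]
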